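-- pv_equiv track=rewrite | github.com/luciomondelli/CuatroEnLinea | CuatroEnLinea.py | completarTableroEnOrden
-- ===== SOURCE A (Python) =====
-- def soltarFichaEnColumna(ficha,columna,tablero):
-- 	for fila in range(6,0,-1):
-- 		if tablero[fila - 1][columna - 1] == 0:
-- 			tablero[fila - 1][columna - 1] = ficha
-- 			return
--
-- def completarTableroEnOrden(secuencia, tablero):
-- 	x = 0
-- 	for i in secuencia:
-- 		if x % 2 == 0:
-- 			soltarFichaEnColumna(1,i,tablero)
-- 			x += 1
-- 		else:
-- 			soltarFichaEnColumna(2,i,tablero)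
-- 			x += 1
-- 	return tablero
-- ===== SOURCE B (Python) =====
-- def completarTableroEnOrden(secuencia, tablero):
--     # Stage 1: group the whole sequence by column, recording each move's token
--     # (player 1 on even move index, player 2 on odd).
--     porCol = {}
--     for k, col in enumerate(secuencia):
--         porCol.setdefault(col, []).append(1 if k % 2 == 0 else 2)
--     # Stage 2: per column, list its empty rows bottom-up once and zip them with
--     # that column's tokens (zip truncates: extra tokens on a full column drop out).
--     for col, fichas in porCol.items():
--         c = col - 1
--         vacias = [f for f in range(5, -1, -1) if tablero[f][c] == 0]
--         for f, ficha in zip(vacias, fichas):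
--             tablero[f][c] = ficha
--     return tablero
-- ===== Notes on version B (the rewrite author's own statement) =====
-- stated objective: alternative
-- what changed: B replaces A's per-move bottom-up column scan with a two-stage grouped algorithm: it first buckets the whole sequence by column in a dict (token from enumerate parity), then processes each column once, zipping its bottom-up list of empty rows with that column's tokens; correctness rests on drops into distinct columns commuting.
import Mathlib
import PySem

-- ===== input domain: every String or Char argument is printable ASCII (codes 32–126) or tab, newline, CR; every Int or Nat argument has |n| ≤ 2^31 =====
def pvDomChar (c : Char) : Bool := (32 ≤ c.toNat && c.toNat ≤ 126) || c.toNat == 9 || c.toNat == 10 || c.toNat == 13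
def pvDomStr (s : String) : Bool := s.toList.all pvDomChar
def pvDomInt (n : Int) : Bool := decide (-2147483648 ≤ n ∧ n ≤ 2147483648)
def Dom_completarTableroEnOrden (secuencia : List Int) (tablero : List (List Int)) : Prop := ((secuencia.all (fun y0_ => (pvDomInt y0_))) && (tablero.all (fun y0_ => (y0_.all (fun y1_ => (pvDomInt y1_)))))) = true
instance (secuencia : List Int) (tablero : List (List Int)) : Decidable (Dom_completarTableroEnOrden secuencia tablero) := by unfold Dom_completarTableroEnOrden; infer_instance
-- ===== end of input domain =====

-- B replaces A's per-move bottom-up column scan by a two-stage grouped algorithm: bucket the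
-- sequence by column (token from enumerate parity), then per column zip its bottom-up empty rows
-- with that column's tokens.  Both Pythons mutate tablero in place and return it; the equivalence
-- proved here is about the returned board.


-- ===== PORT A =====
-- tablero[f][c] as a value; pyGetD's default stands for Python's IndexError — exact on Pre_,
-- where every index is in range.
def pvCell (t : List (List Int)) (f c : Int) : Int :=
  PySem.List.pyGetD (PySem.List.pyGetD t f []) c 0

-- tablero[f][c] = v (in-place write modelled functionally; exact on Pre_)
def pvSetCell (t : List (List Int)) (f c v : Int) : List (List Int) :=
  PySem.List.pySetD t f (PySem.List.pySetD (PySem.List.pyGetD t f []) c v)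

-- 'for fila in range(6,0,-1): if … : …; return'
def soltarGo (ficha columna : Int) (tablero : List (List Int)) : List Int → List (List Int)
  | [] => tablero
  | fila :: rest =>
      if pvCell tablero (fila - 1) (columna - 1) == 0 then
        pvSetCell tablero (fila - 1) (columna - 1) ficha
      else soltarGo ficha columna tablero rest

def soltarFichaEnColumna (ficha columna : Int) (tablero : List (List Int)) : List (List Int) :=
  soltarGo ficha columna tablero (PySem.List.pyRange 6 0 (-1))

def pvStepA (st : Int × List (List Int)) (i : Int) : Int × List (List Int) :=
  if PySem.Int.mod st.1 2 == 0 then (st.1 + 1, soltarFichaEnColumna 1 i st.2)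
  else (st.1 + 1, soltarFichaEnColumna 2 i st.2)

def completarTableroEnOrden (secuencia : List Int) (tablero : List (List Int)) : List (List Int) :=
  (secuencia.foldl pvStepA ((0 : Int), tablero)).2

-- ===== PORT B =====
-- '1 if k % 2 == 0 else 2'
def pvTok (k : Int) : Int := if PySem.Int.mod k 2 == 0 then 1 else 2

-- stage 1: porCol.setdefault(col, []).append(tok)
def pvGroup (secuencia : List Int) : PySem.Dict Int (List Int) :=
  (PySem.List.enumerate secuencia).foldl
    (fun d p => d.modify p.2 [] (fun l => l ++ [pvTok p.1])) PySem.Dict.empty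

-- stage 2 body: one column's empty rows bottom-up, zipped with its tokens
def pvPlaceCol (t : List (List Int)) (p : Int × List Int) : List (List Int) :=
  let c := p.1 - 1
  let vacias := (PySem.List.pyRange 5 (-1) (-1)).filter (fun f => pvCell t f c == 0)
  (vacias.zip p.2).foldl (fun t q => pvSetCell t q.1 c q.2) t

def completarTableroEnOrden_alt (secuencia : List Int) (tablero : List (List Int)) : List (List Int) :=
  (pvGroup secuencia).items.foldl pvPlaceCol tablero

-- ===== PRECONDITION & SPEC =====
-- Pre_ excludes (a) inputs where the Python A raises IndexError (fewer than 6 rows, or a column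
-- beyond a row's width), (b) ragged boards where A's early stop returns while B reads the full
-- column and raises, and (c) non-positive column numbers, outside the game's 1-based domain,
-- where A's per-row negative-index wraparound can alias two column values that B's grouping
-- reorders (see the cites).
def Pre_completarTableroEnOrden (secuencia : List Int) (tablero : List (List Int)) : Prop :=
  ∀ i ∈ secuencia, 1 ≤ i ∧ 6 ≤ tablero.length ∧
    ∀ f : Nat, f < 6 → i - 1 < ((tablero.getD f []).length : Int)
instance (secuencia : List Int) (tablero : List (List Int)) : Decidable (Pre_completarTableroEnOrden secuencia tablero) := by unfold Pre_completarTableroEnOrden; infer_instance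

def pvWitness_completarTableroEnOrden : List Int × List (List Int) :=
  ([1, 2, 1], [[0, 0], [0, 0], [0, 0], [0, 0], [0, 0], [0, 0]])

def Spec_completarTableroEnOrden (secuencia : List Int) (tablero : List (List Int)) (out : List (List Int)) : Prop := out = completarTableroEnOrden_alt secuencia tablero
instance (secuencia : List Int) (tablero : List (List Int)) (out : List (List Int)) : Decidable (Spec_completarTableroEnOrden secuencia tablero out) := by unfold Spec_completarTableroEnOrden; infer_instance

-- ===== CLAIM (what is proved, stated in full; the proofs are below) =====
def Claim_equal_completarTableroEnOrden : Prop := ∀ (secuencia : List Int) (tablero : List (List Int)), Dom_completarTableroEnOrden secuencia tablero → Pre_completarTableroEnOrden secuencia tablero → Spec_completarTableroEnOrden secuencia tablero (completarTableroEnOrden secuencia tablero)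

-- ===== LEMMAS AND PROOFS =====

-- `List.set` through `getD`, in one formula (used throughout the cell lemmas below)
lemma getD_set {α : Type} (l : List α) (i j : Nat) (a d : α) :
    (l.set i a).getD j d = if i = j ∧ i < l.length then a else l.getD j d := by
  by_cases h1 : i = j
  · subst h1
    by_cases h2 : i < l.length
    · simp [List.getD_eq_getElem?_getD, h2]
    · rw [List.set_eq_of_length_le (by omega)]
      simp [h2]
  · simp [List.getD_eq_getElem?_getD, List.getElem?_set_ne h1, h1]

-- Nat-indexed views of the two cell primitives (proof side only).
def cellN (t : List (List Int)) (fn cn : Nat) : Int := (t.getD fn []).getD cn 0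
def setN (t : List (List Int)) (fn cn : Nat) (v : Int) : List (List Int) :=
  t.set fn ((t.getD fn []).set cn v)

lemma pvCell_nonneg (t : List (List Int)) (f c : Int) (hf : 0 ≤ f) (hc : 0 ≤ c) :
    pvCell t f c = cellN t f.toNat c.toNat := by
  rw [pvCell, cellN, show f = ((f.toNat : Nat) : Int) from (Int.toNat_of_nonneg hf).symm,
      show c = ((c.toNat : Nat) : Int) from (Int.toNat_of_nonneg hc).symm,
      PySem.List.pyGetD_natCast, PySem.List.pyGetD_natCast]
  simp only [Int.toNat_natCast]

lemma pvSetCell_nonneg (t : List (List Int)) (f c v : Int) (hf : 0 ≤ f) (hc : 0 ≤ c) :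
    pvSetCell t f c v = setN t f.toNat c.toNat v := by
  rw [pvSetCell, setN, show f = ((f.toNat : Nat) : Int) from (Int.toNat_of_nonneg hf).symm,
      show c = ((c.toNat : Nat) : Int) from (Int.toNat_of_nonneg hc).symm,
      PySem.List.pyGetD_natCast, PySem.List.pySetD_natCast, PySem.List.pySetD_natCast]
  simp only [Int.toNat_natCast]

lemma cellN_setN_ne (t : List (List Int)) (fn cn gn dn : Nat) (v : Int)
    (h : gn ≠ fn ∨ dn ≠ cn) : cellN (setN t fn cn v) gn dn = cellN t gn dn := by
  unfold cellN setN
  rw [getD_set]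
  by_cases hfg : fn = gn ∧ fn < t.length
  · rcases h with h | h
    · exact absurd hfg.1 (fun e => h e.symm)
    · rw [if_pos hfg, getD_set, if_neg (fun e => h e.1.symm), hfg.1]
  · rw [if_neg hfg]

lemma cellN_setN_self (t : List (List Int)) (fn cn : Nat) (v : Int)
    (hf : fn < t.length) (hc : cn < (t.getD fn []).length) :
    cellN (setN t fn cn v) fn cn = v := by
  unfold cellN setN
  rw [getD_set, if_pos ⟨rfl, hf⟩, getD_set, if_pos ⟨rfl, hc⟩]

lemma setN_comm (t : List (List Int)) (fn cn gn dn : Nat) (v w : Int) (h : cn ≠ dn) :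
    setN (setN t fn cn v) gn dn w = setN (setN t gn dn w) fn cn v := by
  unfold setN
  by_cases hfg : fn = gn
  · subst hfg
    by_cases hl : fn < t.length
    · rw [getD_set, if_pos ⟨rfl, by simpa using hl⟩, getD_set, if_pos ⟨rfl, by simpa using hl⟩,
          List.set_set, List.set_set, List.set_comm _ _ h]
    · have e1 : t.set fn ((t.getD fn []).set cn v) = t := List.set_eq_of_length_le (by omega)
      have e2 : t.set fn ((t.getD fn []).set dn w) = t := List.set_eq_of_length_le (by omega)
      simp only [e1, e2]
  · rw [getD_set, if_neg (fun e => hfg e.1), getD_set, if_neg (fun e => hfg e.1.symm),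
        List.set_comm _ _ hfg]

-- The bottom-up list of a column's empty rows, and a single normalized drop.
def empties (t : List (List Int)) (c : Int) : List Int :=
  (PySem.List.pyRange 5 (-1) (-1)).filter (fun f => pvCell t f c == 0)

def drop1 (ficha c : Int) (t : List (List Int)) : List (List Int) :=
  match empties t c with
  | [] => t
  | r :: _ => pvSetCell t r c ficha

lemma mem_empties_bounds (t : List (List Int)) (c r : Int) (h : r ∈ empties t c) :
    0 ≤ r ∧ r < 6 := by
  have hm : r ∈ PySem.List.pyRange 5 (-1) (-1) := (List.mem_filter.mp h).1
  rw [show PySem.List.pyRange 5 (-1) (-1) = [5, 4, 3, 2, 1, 0] from by decide] at hm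
  simp at hm
  omega

lemma nodup_empties (t : List (List Int)) (c : Int) : (empties t c).Nodup := by
  have h : (PySem.List.pyRange 5 (-1) (-1)).Nodup := by decide
  exact h.filter _

-- A's helper IS the normalized drop.
lemma soltar_eq (ficha i : Int) (t : List (List Int)) :
    soltarFichaEnColumna ficha i t = drop1 ficha (i - 1) t := by
  rw [soltarFichaEnColumna, show PySem.List.pyRange 6 0 (-1) = [6, 5, 4, 3, 2, 1] from by decide]
  unfold drop1 empties
  rw [show PySem.List.pyRange 5 (-1) (-1) = [5, 4, 3, 2, 1, 0] from by decide]
  by_cases c5 : pvCell t 5 (i - 1) = 0 <;>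
  by_cases c4 : pvCell t 4 (i - 1) = 0 <;>
  by_cases c3 : pvCell t 3 (i - 1) = 0 <;>
  by_cases c2 : pvCell t 2 (i - 1) = 0 <;>
  by_cases c1 : pvCell t 1 (i - 1) = 0 <;>
  by_cases c0 : pvCell t 0 (i - 1) = 0 <;>
  norm_num [soltarGo, c0, c1, c2, c3, c4, c5]

-- Reads of column c are unaffected by a write in column d ≠ c.
lemma empties_setcell_ne (t : List (List Int)) (c d r v : Int)
    (hc : 0 ≤ c) (hd : 0 ≤ d) (hr : 0 ≤ r) (hne : c ≠ d) :
    empties (pvSetCell t r d v) c = empties t c := by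
  unfold empties
  refine List.filter_congr ?_
  intro f hf
  have hfb : 0 ≤ f := by
    rw [show PySem.List.pyRange 5 (-1) (-1) = [5, 4, 3, 2, 1, 0] from by decide] at hf
    simp at hf; omega
  rw [pvSetCell_nonneg t r d v hr hd, pvCell_nonneg _ f c hfb hc, pvCell_nonneg _ f c hfb hc,
      cellN_setN_ne _ _ _ _ _ _ (Or.inr (by omega))]

lemma drop1_eq_nil (f c : Int) (t : List (List Int)) (h : empties t c = []) :
    drop1 f c t = t := by simp [drop1, h]

lemma drop1_eq_cons (f c r : Int) (es : List Int) (t : List (List Int))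
    (h : empties t c = r :: es) : drop1 f c t = pvSetCell t r c f := by simp [drop1, h]

lemma drop1_comm (f g c d : Int) (t : List (List Int))
    (hc : 0 ≤ c) (hd : 0 ≤ d) (hne : c ≠ d) :
    drop1 f c (drop1 g d t) = drop1 g d (drop1 f c t) := by
  rcases hEd : empties t d with _ | ⟨r', es'⟩ <;> rcases hEc : empties t c with _ | ⟨r, es⟩
  · rw [drop1_eq_nil g d t hEd, drop1_eq_nil f c t hEc, drop1_eq_nil g d t hEd]
  · have hr := (mem_empties_bounds t c r (by rw [hEc]; exact List.mem_cons_self ..)).1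
    rw [drop1_eq_nil g d t hEd, drop1_eq_cons f c r es t hEc,
        drop1_eq_nil g d _ (by rw [empties_setcell_ne t d c r f hd hc hr (Ne.symm hne), hEd])]
  · have hr' := (mem_empties_bounds t d r' (by rw [hEd]; exact List.mem_cons_self ..)).1
    rw [drop1_eq_cons g d r' es' t hEd,
        drop1_eq_nil f c _ (by rw [empties_setcell_ne t c d r' g hc hd hr' hne, hEc]),
        drop1_eq_nil f c t hEc, drop1_eq_cons g d r' es' t hEd]
  · have hr := (mem_empties_bounds t c r (by rw [hEc]; exact List.mem_cons_self ..)).1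
    have hr' := (mem_empties_bounds t d r' (by rw [hEd]; exact List.mem_cons_self ..)).1
    rw [drop1_eq_cons g d r' es' t hEd,
        drop1_eq_cons f c r es _ (by rw [empties_setcell_ne t c d r' g hc hd hr' hne, hEc]),
        drop1_eq_cons f c r es t hEc,
        drop1_eq_cons g d r' es' _ (by rw [empties_setcell_ne t d c r f hd hc hr (Ne.symm hne), hEd]),
        pvSetCell_nonneg t r' d g hr' hd, pvSetCell_nonneg t r c f hr hc,
        pvSetCell_nonneg _ r c f hr hc, pvSetCell_nonneg _ r' d g hr' hd,
        setN_comm _ _ _ _ _ _ _ (by omega)]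

-- All of one column's drops, in order.
def applyToks (c : Int) (toks : List Int) (t : List (List Int)) : List (List Int) :=
  toks.foldl (fun t f => drop1 f c t) t

lemma applyToks_drop1_comm (c d g : Int) (toks : List Int) (t : List (List Int))
    (hc : 0 ≤ c) (hd : 0 ≤ d) (hne : c ≠ d) :
    applyToks c toks (drop1 g d t) = drop1 g d (applyToks c toks t) := by
  induction toks generalizing t with
  | nil => rfl
  | cons f rest ih =>
      show applyToks c rest (drop1 f c (drop1 g d t)) = _
      rw [drop1_comm f g c d t hc hd hne, ih]
      rfl

-- One step of the interleaved game, as a (move index, column) pair.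
def step1 (t : List (List Int)) (p : Int × Int) : List (List Int) :=
  drop1 (pvTok p.1) (p.2 - 1) t

-- All of column c's moves can be pulled to the front of the interleaved fold.
lemma pull (c : Int) (pairs : List (Int × Int)) (t : List (List Int))
    (hc : 1 ≤ c) (hall : ∀ p ∈ pairs, 1 ≤ p.2) :
    pairs.foldl step1 t =
      (pairs.filter (fun p => !(p.2 == c))).foldl step1
        (applyToks (c - 1) ((pairs.filter (fun p => p.2 == c)).map (fun p => pvTok p.1)) t) := by
  induction pairs generalizing t with
  | nil => rfl
  | cons p rest ih =>
      have h2 := hall p (List.mem_cons_self ..)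
      have hall' : ∀ q ∈ rest, 1 ≤ q.2 := fun q hq => hall q (List.mem_cons_of_mem _ hq)
      by_cases hpc : p.2 = c
      · rw [List.foldl_cons,
            List.filter_cons_of_pos (p := fun q : Int × Int => q.2 == c) (by simpa using hpc),
            List.filter_cons_of_neg (p := fun q : Int × Int => !(q.2 == c)) (by simpa using hpc),
            List.map_cons, ih (step1 t p) hall']
        congr 1
        show applyToks (c - 1) _ (drop1 (pvTok p.1) (p.2 - 1) t) = _
        rw [hpc]
        rfl
      · rw [List.foldl_cons,
            List.filter_cons_of_neg (p := fun q : Int × Int => q.2 == c) (by simpa using hpc),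
            List.filter_cons_of_pos (p := fun q : Int × Int => !(q.2 == c)) (by simpa using hpc),
            ih (step1 t p) hall', List.foldl_cons]
        congr 1
        show applyToks (c - 1) _ (drop1 (pvTok p.1) (p.2 - 1) t)
            = step1 (applyToks (c - 1) _ t) p
        rw [applyToks_drop1_comm _ _ _ _ _ (by omega) (by omega) (by omega)]
        rfl

lemma grouped (cols : List Int) (pairs : List (Int × Int)) (t : List (List Int))
    (hnd : cols.Nodup) (hcov : ∀ p ∈ pairs, p.2 ∈ cols)
    (hall : ∀ p ∈ pairs, 1 ≤ p.2) (hcols : ∀ c ∈ cols, 1 ≤ c) :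
    pairs.foldl step1 t =
      cols.foldl (fun t c =>
        applyToks (c - 1) ((pairs.filter (fun p => p.2 == c)).map (fun p => pvTok p.1)) t) t := by
  induction cols generalizing pairs t with
  | nil =>
      have : pairs = [] := by
        cases pairs with
        | nil => rfl
        | cons q _ => exact absurd (hcov q (List.mem_cons_self ..)) (List.not_mem_nil)
      rw [this]
      rfl
  | cons c cs ih =>
      rw [pull c pairs t (hcols c (List.mem_cons_self ..)) hall, List.foldl_cons]
      rw [ih (pairs.filter (fun p => !(p.2 == c))) _
            (List.nodup_cons.mp hnd).2
            (fun p hp => by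
              have hm := List.mem_filter.mp hp
              have := hcov p hm.1
              rcases List.mem_cons.mp this with h | h
              · exact absurd h (by simpa using hm.2)
              · exact h)
            (fun p hp => hall p (List.mem_filter.mp hp).1)
            (fun c' hc' => hcols c' (List.mem_cons_of_mem _ hc'))]
      refine PySem.List.foldl_congr_mem _ _ _ _ ?_
      intro acc c' hc'
      have hne : c' ≠ c := fun e => (List.nodup_cons.mp hnd).1 (e ▸ hc')
      congr 1
      rw [List.filter_filter]
      congr 1
      refine List.filter_congr ?_
      intro p _
      by_cases h : p.2 = c' <;> simp [h, hne]

-- Shape (board and row lengths) is invariant under drops.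
lemma shape_drop1 (f c : Int) (t : List (List Int)) :
    (drop1 f c t).length = t.length ∧
      ∀ gn : Nat, ((drop1 f c t).getD gn []).length = (t.getD gn []).length := by
  rcases hE : empties t c with _ | ⟨r, es⟩
  · rw [drop1_eq_nil f c t hE]
    exact ⟨rfl, fun _ => rfl⟩
  · have hr := (mem_empties_bounds t c r (by rw [hE]; exact List.mem_cons_self ..)).1
    rw [drop1_eq_cons f c r es t hE]
    unfold pvSetCell
    rw [PySem.List.pySetD_of_nonneg t _ hr]
    refine ⟨by simp, ?_⟩
    intro gn
    rw [getD_set]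
    split
    · rename_i hp
      rw [PySem.List.length_pySetD,
          show r = ((r.toNat : Nat) : Int) from (Int.toNat_of_nonneg hr).symm,
          PySem.List.pyGetD_natCast, hp.1]
    · rfl

lemma shape_applyToks (c : Int) (toks : List Int) (t : List (List Int)) :
    (applyToks c toks t).length = t.length ∧
      ∀ gn : Nat, ((applyToks c toks t).getD gn []).length = (t.getD gn []).length := by
  induction toks generalizing t with
  | nil => exact ⟨rfl, fun _ => rfl⟩
  | cons f rest ih =>
      have h1 := shape_drop1 f c t
      have h2 := ih (drop1 f c t)
      exact ⟨h2.1.trans h1.1, fun gn => (h2.2 gn).trans (h1.2 gn)⟩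

-- Filling the first empty row removes exactly it from the empties list.
lemma empties_fill (t : List (List Int)) (c f r : Int) (es : List Int)
    (hc : 0 ≤ c) (hf : f ≠ 0) (hlen : 6 ≤ t.length)
    (hrow : ∀ fn : Nat, fn < 6 → c < ((t.getD fn []).length : Int))
    (h : empties t c = r :: es) :
    empties (pvSetCell t r c f) c = es := by
  have hr := mem_empties_bounds t c r (by rw [h]; exact List.mem_cons_self ..)
  have hnd := nodup_empties t c
  rw [h] at hnd
  have step : ∀ fila ∈ PySem.List.pyRange 5 (-1) (-1),
      (pvCell (pvSetCell t r c f) fila c == 0) = (!(fila == r) && (pvCell t fila c == 0)) := by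
    intro fila hfm
    have hfb : 0 ≤ fila ∧ fila < 6 := by
      rw [show PySem.List.pyRange 5 (-1) (-1) = [5, 4, 3, 2, 1, 0] from by decide] at hfm
      simp at hfm; omega
    rw [pvSetCell_nonneg t r c f hr.1 hc, pvCell_nonneg _ fila c hfb.1 hc]
    by_cases he : fila = r
    · subst he
      rw [cellN_setN_self t _ _ f (by omega) (by have := hrow fila.toNat (by omega); omega)]
      simp [hf]
    · rw [cellN_setN_ne _ _ _ _ _ _ (Or.inl (by omega)), ← pvCell_nonneg t fila c hfb.1 hc]
      simp [he]
  have e1 : empties (pvSetCell t r c f) c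
      = (PySem.List.pyRange 5 (-1) (-1)).filter
          (fun fila => !(fila == r) && (pvCell t fila c == 0)) := by
    unfold empties
    exact List.filter_congr step
  rw [e1, ← List.filter_filter, show (PySem.List.pyRange 5 (-1) (-1)).filter
        (fun fila => pvCell t fila c == 0) = r :: es from h,
      List.filter_cons]
  simp only [beq_self_eq_true, Bool.not_true]
  refine List.filter_eq_self.mpr ?_
  intro a ha
  have : a ≠ r := fun e => (List.nodup_cons.mp hnd).1 (e ▸ ha)
  simp [this]

-- Sequential drops into one column = zip of its (precomputed) empty rows with the tokens.
lemma applyToks_eq_zip (c : Int) (toks : List Int) (t : List (List Int))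
    (hc : 0 ≤ c) (hlen : 6 ≤ t.length)
    (hrow : ∀ fn : Nat, fn < 6 → c < ((t.getD fn []).length : Int))
    (htok : ∀ f ∈ toks, f ≠ 0) :
    applyToks c toks t =
      ((empties t c).zip toks).foldl (fun t q => pvSetCell t q.1 c q.2) t := by
  induction toks generalizing t with
  | nil => simp [applyToks]
  | cons f rest ih =>
      rcases hE : empties t c with _ | ⟨r, es⟩
      · have hid : drop1 f c t = t := by simp [drop1, hE]
        show applyToks c rest (drop1 f c t) = _
        rw [hid, ih t hlen hrow (fun g hg => htok g (List.mem_cons_of_mem _ hg)), hE]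
        rfl
      · have hdrop : drop1 f c t = pvSetCell t r c f := by simp [drop1, hE]
        have hfill := empties_fill t c f r es hc (htok f (List.mem_cons_self ..)) hlen hrow hE
        have hsh := shape_drop1 f c t
        rw [hdrop] at hsh
        show applyToks c rest (drop1 f c t) = _
        rw [hdrop, ih (pvSetCell t r c f) (by omega)
              (fun fn hfn => by have h1 := hsh.2 fn; have h2 := hrow fn hfn; omega)
              (fun g hg => htok g (List.mem_cons_of_mem _ hg)),
            hfill]
        rfl

lemma place_eq (i : Int) (toks : List Int) (t : List (List Int))
    (hi : 1 ≤ i) (hlen : 6 ≤ t.length)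
    (hrow : ∀ fn : Nat, fn < 6 → i - 1 < ((t.getD fn []).length : Int))
    (htok : ∀ f ∈ toks, f ≠ 0) :
    applyToks (i - 1) toks t = pvPlaceCol t (i, toks) := by
  rw [applyToks_eq_zip (i - 1) toks t (by omega) hlen hrow htok]
  rfl

-- A's counter fold is the interleaved fold over enumerate.
lemma stepA_eq (k i : Int) (t : List (List Int)) :
    pvStepA (k, t) i = (k + 1, step1 t (k, i)) := by
  unfold pvStepA step1 pvTok
  by_cases hp : (PySem.Int.mod k 2 == 0) = true <;>
    simp only [hp, if_true, if_false, Bool.false_eq_true, soltar_eq]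

lemma a_eq_seq (s : List Int) (t : List (List Int)) (k : Int) :
    (s.foldl pvStepA (k, t)).2 = (PySem.List.enumerate s k).foldl step1 t := by
  induction s generalizing t k with
  | nil => simp [PySem.List.enumerate_nil]
  | cons i rest ih =>
      rw [PySem.List.enumerate_cons, List.foldl_cons, List.foldl_cons, ← ih, stepA_eq]

-- B's dict items, characterized.
lemma group_items (s : List Int) :
    (pvGroup s).items = (PySem.Set.ofList s).map (fun c =>
      (c, ((PySem.List.enumerate s).filter (fun p => p.2 == c)).map (fun p => pvTok p.1))) := by
  have hnd : (pvGroup s).keys.Nodup := by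
    unfold pvGroup
    exact PySem.Dict.nodup_keys_foldl_modify_key _ _ _ _ _ (by simp)
  have hkeys : (pvGroup s).keys = PySem.Set.ofList s := by
    unfold pvGroup
    rw [PySem.Dict.keys_foldl_modify_key]
    simp [PySem.List.map_snd_enumerate]
    rfl
  have hget : ∀ c, (pvGroup s).getD c [] =
      ((PySem.List.enumerate s).filter (fun p => p.2 == c)).map (fun p => pvTok p.1) := by
    intro c
    unfold pvGroup
    have hre : (PySem.List.enumerate s).foldl
          (fun d p => d.modify p.2 [] (fun l => l ++ [pvTok p.1])) PySem.Dict.empty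
        = ((PySem.List.enumerate s).map (fun p => (p.2, pvTok p.1))).foldl
            (fun d q => d.modify q.1 [] (fun l => l ++ [q.2])) PySem.Dict.empty := by
      rw [List.foldl_map]
    rw [hre, PySem.Dict.getD_foldl_modify_append]
    simp [List.filter_map, List.map_map, Function.comp_def]
  rw [PySem.Dict.items_eq_map_keys _ hnd ([] : List Int), hkeys]
  exact List.map_congr_left (fun c _ => by rw [hget c])

lemma pvTok_ne_zero (k : Int) : pvTok k ≠ 0 := by
  unfold pvTok
  split <;> decide

-- The grouped fold, with each column rendered by pvPlaceCol on the evolving board.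
lemma fold_cols (cols : List Int) (toksOf : Int → List Int) (t : List (List Int))
    (hcols : ∀ c ∈ cols, 1 ≤ c ∧ 6 ≤ t.length ∧
      ∀ fn : Nat, fn < 6 → c - 1 < ((t.getD fn []).length : Int))
    (htoks : ∀ c f, f ∈ toksOf c → f ≠ 0) :
    cols.foldl (fun t c => applyToks (c - 1) (toksOf c) t) t =
      cols.foldl (fun t c => pvPlaceCol t (c, toksOf c)) t := by
  induction cols generalizing t with
  | nil => rfl
  | cons c cs ih =>
      obtain ⟨hc1, hlen, hrow⟩ := hcols c (List.mem_cons_self ..)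
      rw [List.foldl_cons, List.foldl_cons,
          place_eq c (toksOf c) t hc1 hlen hrow (fun f hf => htoks c f hf)]
      have hsh := shape_applyToks (c - 1) (toksOf c) t
      rw [place_eq c (toksOf c) t hc1 hlen hrow (fun f hf => htoks c f hf)] at hsh
      refine ih _ ?_
      intro c' hc'
      obtain ⟨h1, h2, h3⟩ := hcols c' (List.mem_cons_of_mem _ hc')
      exact ⟨h1, by omega, fun fn hfn => by have := hsh.2 fn; have := h3 fn hfn; omega⟩

-- ===== VERDICT (by name: the statement is the Claim_ definition above) =====
theorem completarTableroEnOrden_spec : Claim_equal_completarTableroEnOrden := by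
  intro s t _ hpre
  unfold Spec_completarTableroEnOrden completarTableroEnOrden completarTableroEnOrden_alt
  have hmem : ∀ p ∈ PySem.List.enumerate s 0, p.2 ∈ s := by
    intro p hp
    obtain ⟨k, hk, rfl⟩ := (PySem.List.mem_enumerate_iff _ _ _).mp hp
    exact List.getElem_mem hk
  rw [a_eq_seq s t 0, group_items s, List.foldl_map,
      grouped (PySem.Set.ofList s) (PySem.List.enumerate s 0) t
        (PySem.Set.nodup_ofList s)
        (fun p hp => (PySem.List.mem_dedup s p.2).mpr (hmem p hp))
        (fun p hp => (hpre p.2 (hmem p hp)).1)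
        (fun c hc => (hpre c ((PySem.List.mem_dedup s c).mp hc)).1),
      fold_cols (PySem.Set.ofList s) _ t
        (fun c hc => hpre c ((PySem.List.mem_dedup s c).mp hc))
        (fun c f hf => by
          obtain ⟨p, _, rfl⟩ := List.mem_map.mp hf
          exact pvTok_ne_zero p.1)]
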